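-- pv_equiv track=rewrite | github.com/EmiliaPsacharopoulos/multi-agent-collision-avoidance | MAPF/cbs.py | optimize_paths
-- ===== SOURCE A (Python) =====
-- def optimize_paths(paths):
--     """Optimize the paths by removing redundant waypoints"""
--
--     for path in paths:
--         for i in range(len(path) - 1, 0, -1):
--             if path[i] == path[i-1]:
--                 path.pop(i)
--             else:
--                 break
--
--     return paths
-- ===== SOURCE B (Python) =====
-- def optimize_paths(paths):
--     """Optimize the paths by removing redundant waypoints"""
--     for path in paths:
--         j = 0
--         for i in range(1, len(path)):
--             if path[i] != path[i-1]:
--                 j = i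
--         del path[j+1:]
--     return paths
-- ===== Notes on version B (the rewrite author's own statement) =====
-- stated objective: alternative
-- what changed: Replaces A's backward early-breaking per-element pop loop with a forward scan that records the index of the last adjacent change and then truncates the trailing equal-run with one bulk deletion.
import Mathlib
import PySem

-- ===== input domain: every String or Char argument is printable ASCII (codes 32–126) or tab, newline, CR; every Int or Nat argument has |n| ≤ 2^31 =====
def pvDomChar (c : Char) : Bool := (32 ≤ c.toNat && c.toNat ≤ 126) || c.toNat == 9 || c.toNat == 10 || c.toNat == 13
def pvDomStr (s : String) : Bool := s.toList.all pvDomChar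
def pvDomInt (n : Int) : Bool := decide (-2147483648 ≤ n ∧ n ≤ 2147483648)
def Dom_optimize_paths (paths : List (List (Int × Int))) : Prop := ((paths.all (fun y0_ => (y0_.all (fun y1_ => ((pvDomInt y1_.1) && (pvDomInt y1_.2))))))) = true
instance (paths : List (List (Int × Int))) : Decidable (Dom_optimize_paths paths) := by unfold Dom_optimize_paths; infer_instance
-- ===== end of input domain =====

-- B replaces A's backward early-breaking pop loop with a forward scan for the last
-- adjacent-change index followed by one bulk truncation (objective: alternative, same cost).
-- Both Pythons mutate the inner lists in place; the equivalence proved here is about the return value.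

-- ===== PORT A =====
-- A's inner loop: i runs from len(path)-1 down to 1; while path[i] == path[i-1], pop index i
-- (the last index of the current list: take i ++ drop (i+1)); on the first inequality, break.
def optAux : List (Int × Int) → Nat → List (Int × Int)
  | p, 0 => p
  | p, (i+1) =>
    if p[i+1]? = p[i]? then
      optAux (p.take (i+1) ++ p.drop (i+2)) i
    else p

def optimize_paths (paths : List (List (Int × Int))) : List (List (Int × Int)) :=
  paths.map (fun path => optAux path (path.length - 1))

-- ===== PORT B =====
-- j := 0; for i in range(1, len(path)): if path[i] != path[i-1]: j = i; then del path[j+1:]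
def lastChange (p : List (Int × Int)) : Nat :=
  (List.range' 1 (p.length - 1)).foldl
    (fun j i => if p[i]? ≠ p[i-1]? then i else j) 0

def optimize_paths_alt (paths : List (List (Int × Int))) : List (List (Int × Int)) :=
  paths.map (fun path => path.take (lastChange path + 1))

-- ===== PRECONDITION & SPEC =====
def Spec_optimize_paths (paths : List (List (Int × Int))) (out : List (List (Int × Int))) : Prop := out = optimize_paths_alt paths
instance (paths : List (List (Int × Int))) (out : List (List (Int × Int))) : Decidable (Spec_optimize_paths paths out) := by unfold Spec_optimize_paths; infer_instance

-- ===== CLAIM (what is proved, stated in full; the proofs are below) =====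
def Claim_equal_optimize_paths : Prop := ∀ (paths : List (List (Int × Int))), Dom_optimize_paths paths → Spec_optimize_paths paths (optimize_paths paths)

-- ===== LEMMAS AND PROOFS =====

-- the fold result is bounded by every bound dominating the start value and all list elements
lemma foldl_le {f : Nat → Nat → Nat} {l : List Nat} {j m : Nat}
    (hj : j ≤ m) (hl : ∀ x ∈ l, x ≤ m)
    (hf : ∀ j x, f j x = x ∨ f j x = j) :
    l.foldl f j ≤ m := by
  induction l generalizing j with
  | nil => simpa using hj
  | cons a t ih =>
    simp only [List.foldl_cons]
    have hstep : f j a ≤ m := by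
      rcases hf j a with h | h <;> rw [h]
      · exact hl a (by simp)
      · exact hj
    exact ih hstep (fun x hx => hl x (by simp [hx]))

lemma lastChange_le (p : List (Int × Int)) : lastChange p ≤ p.length - 1 := by
  unfold lastChange
  apply foldl_le (Nat.zero_le _)
  · intro x hx
    rcases List.mem_range'.mp hx with ⟨i, hi, rfl⟩
    omega
  intro j x
  split
  · exact Or.inl rfl
  · exact Or.inr rfl

-- the main per-path equivalence, under the loop invariant n = length - 1
lemma optAux_eq (n : Nat) (p : List (Int × Int)) (h : p.length = n + 1) :
    optAux p n = p.take (lastChange p + 1) := by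
  induction n generalizing p with
  | zero =>
    simp only [optAux]
    rw [show lastChange p = 0 by unfold lastChange; rw [h]; simp]
    exact (List.take_of_length_le (by omega)).symm
  | succ n ih =>
    have hrange : List.range' 1 (p.length - 1) = List.range' 1 n ++ [n + 1] := by
      rw [h]; simpa [Nat.add_comm] using List.range'_concat (s := 1) (n := n) (step := 1)
    by_cases hc : p[n+1]? = p[n]?
    · -- pop: recurse on q = take (n+1)
      have hdrop : p.drop (n + 2) = [] := List.drop_eq_nil_of_le (by omega)
      have hstep : optAux p (n + 1) = optAux (p.take (n + 1)) n := by
        simp only [optAux, if_pos hc, hdrop, List.append_nil]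
      have hqlen : (p.take (n + 1)).length = n + 1 := by simp [h]
      have hget : ∀ i, i ≤ n → (p.take (n + 1))[i]? = p[i]? := by
        intro i hi
        exact List.getElem?_take_of_lt (by omega)
      -- lastChange p = lastChange (take (n+1) p): the last fold step is a no-op, earlier steps agree
      have hlc : lastChange p = lastChange (p.take (n + 1)) := by
        unfold lastChange
        rw [hrange, List.foldl_append]
        simp only [List.foldl_cons, List.foldl_nil, ne_eq, Nat.add_sub_cancel]
        rw [if_neg (not_not_intro hc), hqlen]
        simp only [Nat.add_sub_cancel]
        apply PySem.List.foldl_congr_mem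
        intro j i hi
        rcases List.mem_range'.mp hi with ⟨k, hk, rfl⟩
        rw [hget (1 + 1 * k) (by omega), hget (1 + 1 * k - 1) (by omega)]
      have hble : lastChange (p.take (n + 1)) ≤ n := by
        have := lastChange_le (p.take (n + 1))
        omega
      rw [hstep, ih _ hqlen, hlc, List.take_take, Nat.min_eq_left (by omega)]
    · -- break: result is p; the last fold step sets j = n+1, so take (n+2) = p
      have hstep : optAux p (n + 1) = p := by simp only [optAux, if_neg hc]
      have hlc : lastChange p = n + 1 := by
        unfold lastChange
        rw [hrange, List.foldl_append]
        simp [hc]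
      rw [hstep, hlc]
      exact (List.take_of_length_le (by omega)).symm

-- ===== VERDICT (by name: the statement is the Claim_ definition above) =====
theorem optimize_paths_spec : Claim_equal_optimize_paths := by
  intro paths _
  unfold Spec_optimize_paths optimize_paths optimize_paths_alt
  apply List.map_congr_left
  intro p _
  cases p with
  | nil => simp [optAux, lastChange]
  | cons a t =>
    simpa using optAux_eq t.length (a :: t) (by simp)
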